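-- pv_equiv track=rewrite | github.com/MariusJugaru/Stenography-Web-Server | EncodeScript.py | encPix
-- ===== SOURCE A (Python) =====
-- def encPix(pix, message):
--     binMessage = []
--
--     for i in message:
--         # Obtinem valoarea Ascii a caracterului pe care o transformam in format de 8 biti
--         # apoi o anexam listei
--         binMessage.append(format(ord(i), '08b'))
--
--     lenMessage = len(binMessage)
--
--     for i in range(lenMessage):
--         # Extragem cate 3 pixeli
--         pixGroup = pix[i * 3: i * 3 + 3]
--         pixList = [item for t in pixGroup for item in t]
--
--         # Valoarea R, G, B din pixel devine impar pentru 1 si par pentru 0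
--         for j in range(0, 8):
--             if (binMessage[i][j] == '0' and pixList[j] % 2 != 0):
--                 pixList[j] -= 1
--
--             elif (binMessage[i][j] == '1' and pixList[j] % 2 == 0):
--                 if(pixList[j] != 0):
--                     pixList[j] -= 1
--                 else:
--                     pixList[j] += 1
--
--         #Ultima valoare din set determina daca citirea continua
--         # 0 - se citeste; 1 - se opreste
--         if (i == lenMessage - 1):
--             if (pixList[8] % 2 == 0):
--                 if(pixList[8] != 0):
--                     pixList[8] -= 1
--                 else:
--                     pixList[8] += 1
--         else:
--             if (pixList[8] % 2 != 0):
--                 pixList[8] -= 1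
--
--         pixList = tuple(pixList)
--         yield pixList[0:3]
--         yield pixList[3:6]
--         yield pixList[6:9]
-- ===== SOURCE B (Python) =====
-- def _chunk3(vals):
--     # regroup a flat list (length a multiple of 3) into 3-tuples, recursively
--     if not vals:
--         return []
--     return [tuple(vals[0:3])] + _chunk3(vals[3:])
--
-- def encPix(pix, message):
--     n = len(message)
--     # one flat target-parity bitstream for the whole message:
--     # 8 bits per character (MSB first) followed by a stop flag (1 only after the last char)
--     bits = []
--     for i, ch in enumerate(message):
--         o = ord(ch)
--         bits += [(o >> (7 - j)) & 1 for j in range(8)] + [1 if i == n - 1 else 0]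
--     # the flat stream of channel values the message occupies
--     flat = [v for p in pix[:3 * n] for v in p]
--     # closed-form parity correction: step down on mismatch, except 0 with target 1 steps up
--     out = [1 if bits[t] == 1 and flat[t] == 0 else flat[t] - (flat[t] + bits[t]) % 2
--            for t in range(9 * n)]
--     return _chunk3(out)
-- ===== Notes on version B (the rewrite author's own statement) =====
-- stated objective: alternative
-- what changed: B drops A's per-character pixel-group mutation loops entirely: it builds one flat parity-target bitstream for the whole message via arithmetic shifts (no '08b' format strings), zips it with the flat stream of occupied channel values, applies a closed-form arithmetic parity correction v - (v+b)%2 (with the single 0-goes-to-1 special case), and regroups into tuples with a recursive chunker.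
import Mathlib
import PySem

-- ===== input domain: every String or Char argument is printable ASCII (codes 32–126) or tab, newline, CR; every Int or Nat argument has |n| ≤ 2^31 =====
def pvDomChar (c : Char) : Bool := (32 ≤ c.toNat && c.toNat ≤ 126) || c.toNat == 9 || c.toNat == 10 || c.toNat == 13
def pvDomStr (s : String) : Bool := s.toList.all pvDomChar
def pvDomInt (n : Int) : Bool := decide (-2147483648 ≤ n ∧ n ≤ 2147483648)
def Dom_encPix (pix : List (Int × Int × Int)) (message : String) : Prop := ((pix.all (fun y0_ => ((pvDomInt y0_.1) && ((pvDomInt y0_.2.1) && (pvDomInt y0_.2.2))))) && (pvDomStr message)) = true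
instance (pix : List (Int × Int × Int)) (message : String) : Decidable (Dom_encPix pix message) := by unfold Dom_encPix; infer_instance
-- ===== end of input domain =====

-- B replaces A's per-character mutation loops by one flat whole-message bitstream (arithmetic
-- shifts, no format strings), a zip with the flat channel stream, a closed-form parity fix and
-- a recursive 3-chunker; same O(n) cost, a genuinely different pipeline.
-- A is a generator in Python; equivalence is about the materialised list of yielded tuples.

-- format(n, '08b') : binary digits left-padded with '0' to width 8 (Python A calls format)
def fmt08b (n : Int) : List Char :=
  let b := PySem.Int.toBinChars n
  List.replicate (8 - b.length) '0' ++ b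

-- ===== PORT A =====
def encPix (pix : List (Int × Int × Int)) (message : String) : List (Int × Int × Int) :=
  let binMessage := message.toList.foldl
    (fun acc c => acc ++ [fmt08b (c.toNat : Int)]) ([] : List (List Char))
  let lenMessage := binMessage.length
  (PySem.List.pyRange 0 (lenMessage : Int) 1).foldl (fun out i =>
    let pixGroup := PySem.List.slice pix (some (i * 3)) (some (i * 3 + 3))
    let pixList := pixGroup.flatMap (fun t => [t.1, t.2.1, t.2.2])
    let pixList := (PySem.List.pyRange 0 8 1).foldl (fun pl j =>
      if PySem.List.pyGetD (PySem.List.pyGetD binMessage i []) j ' ' = '0' ∧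
         PySem.Int.mod (PySem.List.pyGetD pl j 0) 2 ≠ 0 then
        PySem.List.pySetD pl j (PySem.List.pyGetD pl j 0 - 1)
      else if PySem.List.pyGetD (PySem.List.pyGetD binMessage i []) j ' ' = '1' ∧
              PySem.Int.mod (PySem.List.pyGetD pl j 0) 2 = 0 then
        if PySem.List.pyGetD pl j 0 ≠ 0 then
          PySem.List.pySetD pl j (PySem.List.pyGetD pl j 0 - 1)
        else
          PySem.List.pySetD pl j (PySem.List.pyGetD pl j 0 + 1)
      else pl) pixList
    let pixList :=
      if i = (lenMessage : Int) - 1 then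
        if PySem.Int.mod (PySem.List.pyGetD pixList 8 0) 2 = 0 then
          if PySem.List.pyGetD pixList 8 0 ≠ 0 then
            PySem.List.pySetD pixList 8 (PySem.List.pyGetD pixList 8 0 - 1)
          else
            PySem.List.pySetD pixList 8 (PySem.List.pyGetD pixList 8 0 + 1)
        else pixList
      else
        if PySem.Int.mod (PySem.List.pyGetD pixList 8 0) 2 ≠ 0 then
          PySem.List.pySetD pixList 8 (PySem.List.pyGetD pixList 8 0 - 1)
        else pixList
    out ++ [(PySem.List.pyGetD pixList 0 0, PySem.List.pyGetD pixList 1 0, PySem.List.pyGetD pixList 2 0),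
            (PySem.List.pyGetD pixList 3 0, PySem.List.pyGetD pixList 4 0, PySem.List.pyGetD pixList 5 0),
            (PySem.List.pyGetD pixList 6 0, PySem.List.pyGetD pixList 7 0, PySem.List.pyGetD pixList 8 0)])
    ([] : List (Int × Int × Int))

-- ===== PORT B =====
-- _chunk3(vals): regroup a flat list into 3-tuples; Python's tuple(vals[0:3]) / vals[3:] is the
-- match on three leading elements (a leftover of 1 or 2 elements never occurs: every input
-- handed to it has length a multiple of 3; those unreachable cases return [] here)
def chunk3 (vals : List Int) : List (Int × Int × Int) :=
  match vals with
  | a :: b :: c :: rest => (a, b, c) :: chunk3 rest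
  | _ => []

def encPix_alt (pix : List (Int × Int × Int)) (message : String) : List (Int × Int × Int) :=
  let n : Int := PySem.Str.len message
  let bits := (PySem.List.enumerate message.toList 0).foldl (fun acc p =>
    acc ++ (((PySem.List.pyRange 0 8 1).map (fun j =>
        -- (o >> (7 - j)) & 1 : Lean's '>>>' on Int is Python's '>>'; '& 1' is PySem.Int.band
        PySem.Int.band ((p.2.toNat : Int) >>> (7 - j).toNat) 1))
      ++ [if p.1 = n - 1 then (1 : Int) else 0])) ([] : List Int)
  let flat := (PySem.List.slice pix none (some (3 * n))).flatMap (fun t => [t.1, t.2.1, t.2.2])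
  let out := (PySem.List.pyRange 0 (9 * n) 1).map (fun t =>
    if PySem.List.pyGetD bits t 0 = 1 ∧ PySem.List.pyGetD flat t 0 = 0 then (1 : Int)
    else PySem.List.pyGetD flat t 0
      - PySem.Int.mod (PySem.List.pyGetD flat t 0 + PySem.List.pyGetD bits t 0) 2)
  chunk3 out

-- ===== PRECONDITION & SPEC =====
-- A raises IndexError (pixList[j] on a short flattened group) exactly when pix holds fewer than
-- 3 pixels per message character; Pre_ excludes exactly those inputs.
def Pre_encPix (pix : List (Int × Int × Int)) (message : String) : Prop :=
  3 * message.toList.length ≤ pix.length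
instance (pix : List (Int × Int × Int)) (message : String) : Decidable (Pre_encPix pix message) := by
  unfold Pre_encPix; infer_instance

def pvWitness_encPix : (List (Int × Int × Int)) × String := ([(1, 2, 3), (4, 0, 255), (7, 8, 9)], "A")

def Spec_encPix (pix : List (Int × Int × Int)) (message : String) (out : List (Int × Int × Int)) : Prop := out = encPix_alt pix message
instance (pix : List (Int × Int × Int)) (message : String) (out : List (Int × Int × Int)) : Decidable (Spec_encPix pix message out) := by unfold Spec_encPix; infer_instance

-- ===== CLAIM (what is proved, stated in full; the proofs are below) =====
def Claim_equal_encPix : Prop := ∀ (pix : List (Int × Int × Int)) (message : String), Dom_encPix pix message → Pre_encPix pix message → Spec_encPix pix message (encPix pix message)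

-- ===== LEMMAS AND PROOFS =====

-- A's per-position update, extracted for the proofs
def astep (c : Char) (v : Int) : Int :=
  if c = '0' ∧ PySem.Int.mod v 2 ≠ 0 then v - 1
  else if c = '1' ∧ PySem.Int.mod v 2 = 0 then (if v ≠ 0 then v - 1 else v + 1)
  else v

-- A's loop body for one message character, extracted for the proofs
def aChar (group : List (Int × Int × Int)) (bs : List Char) (last : Prop) [Decidable last] :
    List (Int × Int × Int) :=
  let pixList := group.flatMap (fun t => [t.1, t.2.1, t.2.2])
  let pixList := (PySem.List.pyRange 0 8 1).foldl (fun pl j =>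
    if PySem.List.pyGetD bs j ' ' = '0' ∧
       PySem.Int.mod (PySem.List.pyGetD pl j 0) 2 ≠ 0 then
      PySem.List.pySetD pl j (PySem.List.pyGetD pl j 0 - 1)
    else if PySem.List.pyGetD bs j ' ' = '1' ∧
            PySem.Int.mod (PySem.List.pyGetD pl j 0) 2 = 0 then
      if PySem.List.pyGetD pl j 0 ≠ 0 then
        PySem.List.pySetD pl j (PySem.List.pyGetD pl j 0 - 1)
      else
        PySem.List.pySetD pl j (PySem.List.pyGetD pl j 0 + 1)
    else pl) pixList
  let pixList :=
    if last then
      if PySem.Int.mod (PySem.List.pyGetD pixList 8 0) 2 = 0 then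
        if PySem.List.pyGetD pixList 8 0 ≠ 0 then
          PySem.List.pySetD pixList 8 (PySem.List.pyGetD pixList 8 0 - 1)
        else
          PySem.List.pySetD pixList 8 (PySem.List.pyGetD pixList 8 0 + 1)
      else pixList
    else
      if PySem.Int.mod (PySem.List.pyGetD pixList 8 0) 2 ≠ 0 then
        PySem.List.pySetD pixList 8 (PySem.List.pyGetD pixList 8 0 - 1)
      else pixList
  [(PySem.List.pyGetD pixList 0 0, PySem.List.pyGetD pixList 1 0, PySem.List.pyGetD pixList 2 0),
   (PySem.List.pyGetD pixList 3 0, PySem.List.pyGetD pixList 4 0, PySem.List.pyGetD pixList 5 0),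
   (PySem.List.pyGetD pixList 6 0, PySem.List.pyGetD pixList 7 0, PySem.List.pyGetD pixList 8 0)]

def fmtOkB : Bool := (List.range 128).all (fun m =>
  ((fmt08b (m : Int)).length == 8) && (fmt08b (m : Int)).all (fun c => c == '0' || c == '1'))

lemma fmtOkB_true : fmtOkB = true := by rfl

lemma fmt_ok (m : Nat) (h : m < 128) :
    (fmt08b (m : Int)).length = 8 ∧ ∀ c ∈ fmt08b (m : Int), c = '0' ∨ c = '1' := by
  have hb := fmtOkB_true
  unfold fmtOkB at hb
  rw [List.all_eq_true] at hb
  have hm := hb m (List.mem_range.mpr h)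
  simp only [Bool.and_eq_true, beq_iff_eq, List.all_eq_true, Bool.or_eq_true] at hm
  exact ⟨hm.1, hm.2⟩

-- (m >> (7-j)) & 1 reads bit j of format(m, '08b'): checked once over the whole 128 × 8 table
def bitsOkB : Bool := (List.range 128).all fun m => (List.range 8).all fun j =>
  PySem.Int.band ((m : Int) >>> ((7 - j : Nat) : Int)) 1 == (if (fmt08b (m : Int)).getD j ' ' = '1' then (1:Int) else 0)

lemma bitsOkB_true : bitsOkB = true := by decide

lemma bit_eq (m j : Nat) (hm : m < 128) (hj : j < 8) :
    PySem.Int.band ((m : Int) >>> ((7 - j : Nat) : Int)) 1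
      = (if (fmt08b (m : Int)).getD j ' ' = '1' then (1:Int) else 0) := by
  have hb := bitsOkB_true
  unfold bitsOkB at hb
  rw [List.all_eq_true] at hb
  have hm' := hb m (List.mem_range.mpr hm)
  rw [List.all_eq_true] at hm'
  have hj' := hm' j (List.mem_range.mpr hj)
  simpa using hj'

-- B's closed-form parity fix agrees with A's branch update on binary targets
lemma bfix_eq (v : Int) (c : Char) (hc : c = '0' ∨ c = '1') :
    astep c v = (if (if c = '1' then (1:Int) else 0) = 1 ∧ v = 0 then (1:Int)
     else v - (v + (if c = '1' then 1 else 0)) % 2) := by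
  rcases hc with rfl | rfl <;> simp [astep] <;> split_ifs <;> omega

lemma branch_eq (c : Char) (pl : List Int) (j : Nat) :
    (if c = '0' ∧ PySem.Int.mod (PySem.List.pyGetD pl (j : Int) 0) 2 ≠ 0 then
       PySem.List.pySetD pl (j : Int) (PySem.List.pyGetD pl (j : Int) 0 - 1)
     else if c = '1' ∧ PySem.Int.mod (PySem.List.pyGetD pl (j : Int) 0) 2 = 0 then
       if PySem.List.pyGetD pl (j : Int) 0 ≠ 0 then
         PySem.List.pySetD pl (j : Int) (PySem.List.pyGetD pl (j : Int) 0 - 1)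
       else PySem.List.pySetD pl (j : Int) (PySem.List.pyGetD pl (j : Int) 0 + 1)
     else pl)
    = pl.set j (astep c (pl.getD j 0)) := by
  by_cases hj : j < pl.length
  · simp only [PySem.List.pyGetD_natCast, PySem.List.pySetD_natCast, astep]
    split_ifs <;> first
      | rfl
      | (rw [List.getD_eq_getElem pl 0 hj]; exact (List.set_getElem_self hj).symm)
  · have hset : ∀ v : Int, PySem.List.pySetD pl (j : Int) v = pl := by
      intro v; simp [PySem.List.pySetD, PySem.List.pySet?, PySem.List.pyIdx?, hj]
    have hget : PySem.List.pyGetD pl (j : Int) 0 = 0 := by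
      simp [PySem.List.pyGetD_natCast, List.getD_eq_getElem?_getD,
        List.getElem?_eq_none (by omega : pl.length ≤ j)]
    rw [List.set_eq_of_length_le (by omega)]
    simp [hget, hset]

lemma foldl_set_astep (bs : List Char) :
    ∀ (m : Nat) (pl : List Int), m ≤ pl.length →
    (List.range m).foldl
        (fun pl (j : Nat) => pl.set j (astep (PySem.List.pyGetD bs (j : Int) ' ') (pl.getD j 0))) pl
      = pl.mapIdx (fun j v => if j < m then astep (PySem.List.pyGetD bs (j : Int) ' ') v else v) := by
  intro m
  induction m with
  | zero => intro pl _; simp [List.mapIdx_eq_zipIdx_map]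
  | succ m ih =>
    intro pl hm
    rw [List.range_succ, List.foldl_append, List.foldl_cons, List.foldl_nil, ih pl (by omega)]
    have hmlt : m < pl.length := by omega
    have hv : (List.mapIdx (fun j v => if j < m then astep (PySem.List.pyGetD bs (j : Int) ' ') v else v) pl).getD m 0
        = pl[m] := by
      rw [List.getD_eq_getElem _ 0 (by simpa using hmlt), List.getElem_mapIdx]
      simp
    rw [hv]
    apply List.ext_getElem
    · simp
    · intro i h1 h2
      simp only [List.length_set, List.length_mapIdx] at h1 h2
      rw [List.getElem_set]
      by_cases hi : i = m
      · subst hi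
        simp only [List.getElem_mapIdx]
        simp
      · simp only [List.getElem_mapIdx]
        by_cases h3 : i < m <;> by_cases h4 : i < m + 1 <;> simp [h3, h4] <;> omega

lemma ninth_eq (pl : List Int) (last : Prop) [Decidable last] :
    (if last then
      if PySem.Int.mod (PySem.List.pyGetD pl 8 0) 2 = 0 then
        if PySem.List.pyGetD pl 8 0 ≠ 0 then
          PySem.List.pySetD pl 8 (PySem.List.pyGetD pl 8 0 - 1)
        else
          PySem.List.pySetD pl 8 (PySem.List.pyGetD pl 8 0 + 1)
      else pl
    else
      if PySem.Int.mod (PySem.List.pyGetD pl 8 0) 2 ≠ 0 then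
        PySem.List.pySetD pl 8 (PySem.List.pyGetD pl 8 0 - 1)
      else pl)
    = pl.set 8 (astep (if last then '1' else '0') (pl.getD 8 0)) := by
  by_cases hl : last
  · simp only [if_pos hl]
    have := branch_eq '1' pl 8
    simp only [Nat.cast_ofNat] at this
    rw [← this]
    simp
  · simp only [if_neg hl]
    have := branch_eq '0' pl 8
    simp only [Nat.cast_ofNat] at this
    rw [← this]
    simp

-- zipping two chunkwise streams chunk by chunk (chunks of equal length zip pointwise)
lemma zip_flatMap {a b c : Type} (l : List a) (f : a → List b) (g : a → List c)
    (h : ∀ x ∈ l, (f x).length = (g x).length) :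
    (l.flatMap f).zip (l.flatMap g) = l.flatMap fun x => (f x).zip (g x) := by
  induction l with
  | nil => simp
  | cons x t ih =>
    simp only [List.flatMap_cons]
    rw [List.zip_append (h x (by simp)), ih (fun y hy => h y (by simp [hy]))]

lemma len_tri (l : List (Int × Int × Int)) :
    (l.flatMap fun t => [t.1, t.2.1, t.2.2]).length = 3 * l.length := by
  induction l with
  | nil => simp
  | cons x t ih => simp [ih]; omega

lemma chunk3_append9 (c r : List Int) (h : c.length = 9) :
    chunk3 (c ++ r) = chunk3 c ++ chunk3 r := by
  rcases c with _ | ⟨e1, _ | ⟨e2, _ | ⟨e3, _ | ⟨e4, _ | ⟨e5, _ | ⟨e6, _ | ⟨e7, _ | ⟨e8, _ | ⟨e9, t⟩⟩⟩⟩⟩⟩⟩⟩⟩ <;>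
    simp at h
  subst h
  simp [chunk3]

lemma chunk3_flatMap {a : Type} (l : List a) (f : a → List Int) (h : ∀ x ∈ l, (f x).length = 9) :
    chunk3 (l.flatMap f) = l.flatMap fun x => chunk3 (f x) := by
  induction l with
  | nil => simp [chunk3]
  | cons x t ih =>
    rw [List.flatMap_cons, chunk3_append9 _ _ (h x (by simp)), List.flatMap_cons,
      ih (fun y hy => h y (by simp [hy]))]

-- a prefix of length 3m read off in consecutive 3-blocks
lemma take_chunks3 {a : Type} (l : List a) (m : Nat) (h : 3 * m ≤ l.length) :
    l.take (3 * m) = (List.range m).flatMap fun k => (l.drop (3 * k)).take 3 := by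
  induction m with
  | zero => simp
  | succ m ih =>
    rw [List.range_succ, List.flatMap_append, List.flatMap_singleton, ← ih (by omega),
      show 3 * (m + 1) = 3 * m + 3 from by ring, List.take_add]

-- one character: A's mutating group update = B's zip-with-parity-fix on the same 9 values
lemma char_eqB (A1 A2 A3 B1 B2 B3 C1 C2 C3 : Int) (bs : List Char) (o : Int)
    (hlen : bs.length = 8) (hbin : ∀ c ∈ bs, c = '0' ∨ c = '1')
    (hbit : ∀ j : Nat, j < 8 →
      PySem.Int.band (o >>> ((7 - j : Nat) : Int)) 1 = (if bs.getD j ' ' = '1' then (1:Int) else 0))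
    (last : Prop) [Decidable last] :
    aChar [(A1, A2, A3), (B1, B2, B3), (C1, C2, C3)] bs last
      = chunk3 (((([(A1, A2, A3), (B1, B2, B3), (C1, C2, C3)] : List (Int × Int × Int)).flatMap
            (fun t => [t.1, t.2.1, t.2.2])).zip
          (((PySem.List.pyRange 0 8 1).map fun j => PySem.Int.band (o >>> (7 - j).toNat) 1)
            ++ [if last then (1:Int) else 0])).map
          fun vb => if vb.2 = 1 ∧ vb.1 = 0 then (1:Int) else vb.1 - PySem.Int.mod (vb.1 + vb.2) 2) := by
  rcases bs with _ | ⟨e0, _ | ⟨e1, _ | ⟨e2, _ | ⟨e3, _ | ⟨e4, _ | ⟨e5, _ | ⟨e6, _ | ⟨e7, t⟩⟩⟩⟩⟩⟩⟩⟩ <;> simp at hlen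
  subst hlen
  have h0 := hbin e0 (by simp); have h1 := hbin e1 (by simp); have h2 := hbin e2 (by simp)
  have h3 := hbin e3 (by simp); have h4 := hbin e4 (by simp); have h5 := hbin e5 (by simp)
  have h6 := hbin e6 (by simp); have h7 := hbin e7 (by simp)
  have hb0 := hbit 0 (by omega); have hb1 := hbit 1 (by omega); have hb2 := hbit 2 (by omega)
  have hb3 := hbit 3 (by omega); have hb4 := hbit 4 (by omega); have hb5 := hbit 5 (by omega)
  have hb6 := hbit 6 (by omega); have hb7 := hbit 7 (by omega)
  simp only [List.getD_cons_zero, List.getD_cons_succ] at hb0 hb1 hb2 hb3 hb4 hb5 hb6 hb7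
  show aChar _ _ _ = _
  unfold aChar
  simp only []
  rw [show PySem.List.pyRange 0 8 1 = (List.range 8).map (fun k : Nat => (k : Int)) from by decide]
  rw [List.foldl_map]
  simp only [branch_eq]
  rw [foldl_set_astep _ 8 _ (by simp)]
  simp only [ninth_eq]
  rw [show List.range 8 = [0, 1, 2, 3, 4, 5, 6, 7] from rfl]
  norm_num at hb0 hb1 hb2 hb3 hb4 hb5 hb6 hb7
  simp only [List.map_cons, List.map_nil, List.flatMap_cons, List.flatMap_nil]
  simp [chunk3, PySem.List.pyGetD_ofNat']
  rw [hb0, hb1, hb2, hb3, hb4, hb5, hb6, hb7]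
  refine ⟨⟨?_, ?_, ?_⟩, ⟨?_, ?_, ?_⟩, ?_, ?_, ?_⟩
  · exact bfix_eq A1 e0 h0
  · exact bfix_eq A2 e1 h1
  · exact bfix_eq A3 e2 h2
  · exact bfix_eq B1 e3 h3
  · exact bfix_eq B2 e4 h4
  · exact bfix_eq B3 e5 h5
  · exact bfix_eq C1 e6 h6
  · exact bfix_eq C2 e7 h7
  · by_cases hl : last <;> simp [hl, astep] <;> split_ifs <;> omega

lemma len_flatMap9 {a : Type} (l : List a) (f : a → List Int)
    (h : ∀ x ∈ l, (f x).length = 9) :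
    (l.flatMap f).length = 9 * l.length := by
  induction l with
  | nil => simp
  | cons x t ih =>
    simp only [List.flatMap_cons, List.length_append, h x (by simp),
      ih (fun y hy => h y (by simp [hy])), List.length_cons]
    omega

-- out[t] over t in range(9n) reads the zipped streams pointwise
lemma idx_zip (x y : List Int) (m : Nat) (hx : x.length = m) (hy : y.length = m) :
    (PySem.List.pyRange 0 ((m : Nat) : Int) 1).map (fun t =>
        if PySem.List.pyGetD y t 0 = 1 ∧ PySem.List.pyGetD x t 0 = 0 then (1 : Int)
        else PySem.List.pyGetD x t 0
          - PySem.Int.mod (PySem.List.pyGetD x t 0 + PySem.List.pyGetD y t 0) 2)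
      = (x.zip y).map (fun vb =>
        if vb.2 = 1 ∧ vb.1 = 0 then (1 : Int) else vb.1 - PySem.Int.mod (vb.1 + vb.2) 2) := by
  rw [PySem.List.pyRange_zero_natCast, List.map_map]
  apply List.ext_getElem
  · simp [hx, hy]
  · intro i h1 h2
    simp only [List.length_map, List.length_range] at h1
    simp only [List.getElem_map, List.getElem_range, Function.comp_apply]
    rw [List.getElem_zip]
    rw [PySem.List.pyGetD_natCast, PySem.List.pyGetD_natCast,
      List.getD_eq_getElem x 0 (by omega), List.getD_eq_getElem y 0 (by omega)]

lemma exists3 {a : Type} (l : List a) (h : 3 <= l.length) :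
    ∃ x y z t, l = x :: y :: z :: t := by
  rcases l with _ | ⟨x, _ | ⟨y, _ | ⟨z, t⟩⟩⟩ <;> simp at h
  exact ⟨_, _, _, _, rfl⟩

-- ===== VERDICT (by name: the statement is the Claim_ definition above) =====
theorem encPix_spec : Claim_equal_encPix := by
  intro pix message hdom hpre
  unfold Spec_encPix
  have hchars : ∀ c ∈ message.toList, c.toNat < 128 := by
    unfold Dom_encPix at hdom
    simp only [Bool.and_eq_true, List.all_eq_true] at hdom
    intro c hc
    have hs := hdom.2
    unfold pvDomStr at hs
    rw [List.all_eq_true] at hs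
    have hc' := hs c hc
    unfold pvDomChar at hc'
    simp only [Bool.or_eq_true, Bool.and_eq_true, decide_eq_true_eq, beq_iff_eq] at hc'
    omega
  unfold Pre_encPix at hpre
  unfold encPix encPix_alt
  simp only []
  rw [PySem.List.foldl_append_singleton_eq_map]
  simp only [List.nil_append, List.length_map]
  rw [PySem.List.foldl_append_eq_flatMap, PySem.List.foldl_append_eq_flatMap]
  simp only [List.nil_append]
  rw [PySem.List.enumerate_eq_map_pyRange message.toList 'a']
  simp only [PySem.List.len_eq, PySem.Str.len_eq]
  rw [PySem.List.pyRange_zero_natCast]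
  rw [List.flatMap_map, List.flatMap_map, List.flatMap_map]
  rw [show (3 : Int) * ((message.toList.length : Nat) : Int)
        = ((3 * message.toList.length : Nat) : Int) from by push_cast; ring]
  rw [PySem.List.slice_to_natCast]
  rw [take_chunks3 pix message.toList.length hpre]
  rw [List.flatMap_assoc]
  rw [show (9 : Int) * ((message.toList.length : Nat) : Int)
        = ((9 * message.toList.length : Nat) : Int) from by push_cast; ring]
  rw [idx_zip _ _ (9 * message.toList.length) ?hx ?hy]
  case hx =>
    rw [len_flatMap9 _ _ ?h9f, List.length_range]
    case h9f =>
      intro k hk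
      rw [List.mem_range] at hk
      rw [len_tri, List.length_take, List.length_drop]
      omega
  case hy =>
    rw [len_flatMap9 _ _ ?h9b, List.length_range]
    case h9b =>
      intro k hk
      simp [PySem.List.length_pyRange_one]
  rw [zip_flatMap (List.range message.toList.length) _ _ ?hlen]
  case hlen =>
    intro k hk
    rw [List.mem_range] at hk
    rw [len_tri, List.length_take, List.length_drop]
    simp [PySem.List.length_pyRange_one]
    omega
  rw [List.map_flatMap]
  rw [chunk3_flatMap _ _ ?h9]
  case h9 =>
    intro k hk
    rw [List.mem_range] at hk
    rw [List.length_map, List.length_zip, len_tri, List.length_take, List.length_drop]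
    simp [PySem.List.length_pyRange_one]
    omega
  apply List.flatMap_congr
  intro k hk
  rw [List.mem_range] at hk
  simp only []
  have hbm : PySem.List.pyGetD (message.toList.map (fun c => fmt08b (c.toNat : Int))) (k : Int) []
      = fmt08b ((message.toList[k]'hk).toNat : Int) := by
    rw [PySem.List.pyGetD_natCast, List.getD_eq_getElem _ _ (by simpa using hk), List.getElem_map]
  have hxk : PySem.List.pyGetD message.toList (k : Int) 'a' = message.toList[k]'hk := by
    rw [PySem.List.pyGetD_natCast, List.getD_eq_getElem _ _ hk]
  simp only [hbm, hxk, show ((k : Int) * 3) = 3 * (k : Int) from by ring]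
  obtain ⟨p0, p1, p2, rest, hd⟩ := exists3 (pix.drop (3 * k)) (by simp; omega)
  have hsl : PySem.List.slice pix (some (3 * (k : Int))) (some (3 * (k : Int) + 3)) = [p0, p1, p2] := by
    rw [show (3 * (k : Int)) = ((3 * k : Nat) : Int) from by push_cast; ring,
        show ((3 * k : Nat) : Int) + 3 = ((3 * k : Nat) : Int) + ((3 : Nat) : Int) from by norm_num]
    rw [PySem.List.slice_natCast_add, hd]
    rfl
  have htk : (pix.drop (3 * k)).take 3 = [p0, p1, p2] := by rw [hd]; rfl
  simp only [hsl, htk]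
  have hm : (message.toList[k]'hk).toNat < 128 := hchars _ (List.getElem_mem hk)
  obtain ⟨hlen, hbin⟩ := fmt_ok _ hm
  exact char_eqB p0.1 p0.2.1 p0.2.2 p1.1 p1.2.1 p1.2.2 p2.1 p2.2.1 p2.2.2 _ _
    hlen hbin (fun j hj => bit_eq _ j hm hj) _
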